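-- pv_equiv track=rewrite | github.com/antshiv/C-Kernel-Engine | scripts/build_ir_v2.py | infer_family
-- ===== SOURCE A (Python) =====
-- from typing import Dict, Iterable, List, Optional, Tuple
--
-- def infer_family(names: Iterable[str]) -> str:
--     names = list(names)
--     if any(n.startswith("blk.") for n in names) and "token_embd.weight" in names:
--         return "gguf_llama"
--     if any("model.layers.0.self_attn.q_proj.weight" in n for n in names):
--         return "hf_llama"
--     if any("transformer.h.0.attn.c_attn.weight" in n for n in names):
--         return "gpt2"
--     return "unknown"
-- ===== SOURCE B (Python) =====
-- def _fingerprint(n):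
--     # 4-bit evidence fingerprint of a single name
--     bits = 0
--     if n.startswith("blk."):
--         bits |= 1
--     if n == "token_embd.weight":
--         bits |= 2
--     if "model.layers.0.self_attn.q_proj.weight" in n:
--         bits |= 4
--     if "transformer.h.0.attn.c_attn.weight" in n:
--         bits |= 8
--     return bits
--
-- # decode table for every possible combined fingerprint, built once
-- _TABLE = [
--     "gguf_llama" if m & 3 == 3 else
--     "hf_llama" if m & 4 else
--     "gpt2" if m & 8 else
--     "unknown"
--     for m in range(16)
-- ]
--
-- def infer_family(names):
--     mask = 0
--     for n in names:
--         mask |= _fingerprint(n)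
--     return _TABLE[mask]
-- ===== Notes on version B (the rewrite author's own statement) =====
-- stated objective: alternative
-- what changed: B maps each name to a 4-bit evidence fingerprint, ORs the fingerprints into one mask, and returns the answer by indexing a precomputed 16-entry lookup table, replacing A's repeated any()/membership scans and branch chain.
import Mathlib
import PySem

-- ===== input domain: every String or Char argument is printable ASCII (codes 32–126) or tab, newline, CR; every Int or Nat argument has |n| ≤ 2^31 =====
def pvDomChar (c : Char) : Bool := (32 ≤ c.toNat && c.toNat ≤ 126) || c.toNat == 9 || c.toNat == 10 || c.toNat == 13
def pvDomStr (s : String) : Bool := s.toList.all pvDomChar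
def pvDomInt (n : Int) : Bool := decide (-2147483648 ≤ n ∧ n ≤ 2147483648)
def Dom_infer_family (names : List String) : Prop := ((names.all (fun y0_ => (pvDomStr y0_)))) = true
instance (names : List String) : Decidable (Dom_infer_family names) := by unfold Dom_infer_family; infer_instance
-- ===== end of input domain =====

-- B replaces A's repeated scans and branch chain by per-name bitmask fingerprints OR-folded
-- into one mask decoded through a precomputed 16-entry table (alternative decomposition).

-- ===== PORT A =====
def infer_family (names : List String) : String :=
  if (names.any (fun n => PySem.Str.startswith n "blk.")) && names.contains "token_embd.weight" then
    "gguf_llama"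
  else if names.any (fun n => PySem.Str.isIn "model.layers.0.self_attn.q_proj.weight" n) then
    "hf_llama"
  else if names.any (fun n => PySem.Str.isIn "transformer.h.0.attn.c_attn.weight" n) then
    "gpt2"
  else
    "unknown"

-- ===== PORT B =====
def fingerprint (n : String) : Nat :=
  let bits : Nat := 0
  let bits := if PySem.Str.startswith n "blk." then bits ||| 1 else bits
  let bits := if n == "token_embd.weight" then bits ||| 2 else bits
  let bits := if PySem.Str.isIn "model.layers.0.self_attn.q_proj.weight" n then bits ||| 4 else bits
  let bits := if PySem.Str.isIn "transformer.h.0.attn.c_attn.weight" n then bits ||| 8 else bits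
  bits

def familyTable : List String :=
  (List.range 16).map (fun m =>
    if m &&& 3 == 3 then "gguf_llama"
    else if m &&& 4 ≠ 0 then "hf_llama"
    else if m &&& 8 ≠ 0 then "gpt2"
    else "unknown")

def infer_family_alt (names : List String) : String :=
  let mask := names.foldl (fun m n => m ||| fingerprint n) 0
  -- _TABLE[mask]: mask < 16 always, so the lookup never fails; getD's default is never used
  familyTable.getD mask ""

-- ===== PRECONDITION & SPEC =====
def Spec_infer_family (names : List String) (out : String) : Prop := out = infer_family_alt names
instance (names : List String) (out : String) : Decidable (Spec_infer_family names out) := by unfold Spec_infer_family; infer_instance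

-- ===== CLAIM =====
def Claim_equal_infer_family : Prop := ∀ (names : List String), Dom_infer_family names → Spec_infer_family names (infer_family names)

-- ===== LEMMAS AND PROOFS =====
theorem fingerprint_eq (n : String) :
    fingerprint n
    = (if PySem.Str.startswith n "blk." then 1 else 0)
      ||| (if n == "token_embd.weight" then 2 else 0)
      ||| (if PySem.Str.isIn "model.layers.0.self_attn.q_proj.weight" n then 4 else 0)
      ||| (if PySem.Str.isIn "transformer.h.0.attn.c_attn.weight" n then 8 else 0) := by
  unfold fingerprint
  split_ifs <;> rfl

theorem or_if (p q : Bool) (c : Nat) :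
    (if (p || q) then c else 0) = (if p then c else 0) ||| (if q then c else 0) := by
  cases p <;> cases q <;> simp

theorem mask_eq (names : List String) (a : Nat) :
    names.foldl (fun m n => m ||| fingerprint n) a
    = a ||| (if names.any (fun n => PySem.Str.startswith n "blk.") then 1 else 0)
        ||| (if names.any (fun n => n == "token_embd.weight") then 2 else 0)
        ||| (if names.any (fun n => PySem.Str.isIn "model.layers.0.self_attn.q_proj.weight" n) then 4 else 0)
        ||| (if names.any (fun n => PySem.Str.isIn "transformer.h.0.attn.c_attn.weight" n) then 8 else 0) := by
  induction names generalizing a with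
  | nil => simp
  | cons x xs ih =>
    rw [List.foldl_cons, ih, fingerprint_eq]
    rw [List.any_cons, List.any_cons, List.any_cons, List.any_cons]
    rw [or_if, or_if, or_if, or_if]
    simp only [Nat.or_assoc, Nat.or_comm, Nat.or_left_comm]

theorem contains_eq_any (names : List String) :
    names.contains "token_embd.weight" = names.any (fun n => n == "token_embd.weight") := by
  induction names with
  | nil => rfl
  | cons x xs ih =>
    simp only [List.contains_cons, List.any_cons, ih]
    congr 1
    exact Bool.beq_comm

-- ===== VERDICT =====
theorem infer_family_spec : Claim_equal_infer_family := by
  intro names _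
  unfold Spec_infer_family infer_family infer_family_alt
  simp only []
  rw [mask_eq, contains_eq_any]
  cases g1 : names.any (fun n => PySem.Str.startswith n "blk.") <;>
  cases g2 : names.any (fun n => n == "token_embd.weight") <;>
  cases g3 : names.any (fun n => PySem.Str.isIn "model.layers.0.self_attn.q_proj.weight" n) <;>
  cases g4 : names.any (fun n => PySem.Str.isIn "transformer.h.0.attn.c_attn.weight" n) <;>
  rfl
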